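-- pv_equiv track=rewrite | github.com/uk0/litex | litex/soc/cores/code_8b10b.py | disparity
-- ===== SOURCE A (Python) =====
-- def disparity(word, nbits):
--     n0 = 0
--     n1 = 0
--     for i in range(nbits):
--         if word & (1 << i):
--             n1 += 1
--         else:
--             n0 += 1
--     return n1 - n0
-- ===== SOURCE B (Python) =====
-- def disparity(word, nbits):
--     n = max(nbits, 0)
--     return 2 * (word & ((1 << n) - 1)).bit_count() - n
-- ===== Notes on version B (the rewrite author's own statement) =====
-- stated objective: faster
-- what changed: Replaces the per-bit counting loop by a closed form: one popcount of the masked word (n1 = popcount(word & (2^n - 1))) and the arithmetic identity n1 - n0 = 2*n1 - n.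
import Mathlib
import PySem

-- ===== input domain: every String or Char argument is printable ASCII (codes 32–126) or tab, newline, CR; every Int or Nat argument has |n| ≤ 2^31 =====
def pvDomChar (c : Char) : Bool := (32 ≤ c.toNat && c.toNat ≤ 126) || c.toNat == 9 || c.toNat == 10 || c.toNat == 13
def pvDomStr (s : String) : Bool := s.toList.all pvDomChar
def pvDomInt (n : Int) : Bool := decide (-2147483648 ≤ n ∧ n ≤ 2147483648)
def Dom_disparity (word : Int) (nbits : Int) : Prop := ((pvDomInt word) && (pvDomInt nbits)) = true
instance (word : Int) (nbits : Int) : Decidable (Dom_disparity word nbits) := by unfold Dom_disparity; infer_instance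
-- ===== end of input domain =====

set_option maxRecDepth 4096


-- B replaces A's per-bit counting loop by one popcount of the masked word plus the identity n1 - n0 = 2*n1 - nbits.

-- ===== PORT A =====
-- the loop body: update (n0, n1) for bit i (branches in A's order)
def dispStep (word : Int) (p : Int × Int) (i : Int) : Int × Int :=
  if PySem.Int.band word ((1 : Int) <<< i.toNat) ≠ 0 then (p.1, p.2 + 1) else (p.1 + 1, p.2)

def disparity (word : Int) (nbits : Int) : Int :=
  let st := (PySem.List.pyRange 0 nbits 1).foldl (dispStep word) (0, 0)
  st.2 - st.1

-- ===== PORT B =====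
def disparity_alt (word : Int) (nbits : Int) : Int :=
  let n := max nbits 0
  2 * (PySem.Int.bitCount (PySem.Int.band word (((1 : Int) <<< n.toNat) - 1)) : Int) - n

-- ===== PRECONDITION & SPEC =====
def Spec_disparity (word : Int) (nbits : Int) (out : Int) : Prop := out = disparity_alt word nbits
instance (word : Int) (nbits : Int) (out : Int) : Decidable (Spec_disparity word nbits out) := by unfold Spec_disparity; infer_instance

-- ===== CLAIM (what is proved, stated in full; the proofs are below) =====
def Claim_equal_disparity : Prop := ∀ (word : Int) (nbits : Int), Dom_disparity word nbits → Spec_disparity word nbits (disparity word nbits)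

-- ===== LEMMAS AND PROOFS =====

-- uniqueness of Euclidean div/mod
theorem pv_divmod (a P q r : Int) (hP : 0 < P) (h : a = r + P * q) (h0 : 0 ≤ r) (hr : r < P) :
    a / P = q ∧ a % P = r := by
  constructor
  · rw [h, Int.add_mul_ediv_left _ _ (ne_of_gt hP), Int.ediv_eq_zero_of_lt h0 hr, zero_add]
  · rw [h, Int.add_mul_emod_self_left, Int.emod_eq_of_lt h0 hr]

-- casting Nat div/mod by 2^n into Int
theorem pv_cast_divmod (m n : Nat) :
    ((m : Int) / 2 ^ n = ((m / 2 ^ n : Nat) : Int)) ∧ ((m : Int) % 2 ^ n = ((m % 2 ^ n : Nat) : Int)) := by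
  have hP : (0 : Int) < 2 ^ n := by positivity
  have hlt : m % 2 ^ n < 2 ^ n := Nat.mod_lt _ (by positivity)
  have hc : ((m % 2 ^ n : Nat) : Int) + (2 : Int) ^ n * ((m / 2 ^ n : Nat) : Int) = (m : Int) := by
    exact_mod_cast Nat.mod_add_div m (2 ^ n)
  refine pv_divmod _ _ _ _ hP (by linarith) (by positivity) (by exact_mod_cast hlt)

-- div/mod of a negative Int by 2^n, through x = -a-1 ≥ 0
theorem pv_neg_divmod (a : Int) (n : Nat) (ha : a < 0) :
    a / 2 ^ n = -(((-a - 1).toNat / 2 ^ n : Nat) : Int) - 1 ∧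
      a % 2 ^ n = 2 ^ n - 1 - (((-a - 1).toNat % 2 ^ n : Nat) : Int) := by
  have hP : (0 : Int) < 2 ^ n := by positivity
  set x := (-a - 1).toNat with hx
  have hxc : (x : Int) = -a - 1 := Int.toNat_of_nonneg (by omega)
  have hlt : x % 2 ^ n < 2 ^ n := Nat.mod_lt _ (by positivity)
  have hltI : ((x % 2 ^ n : Nat) : Int) < 2 ^ n := by exact_mod_cast hlt
  have hc : ((x % 2 ^ n : Nat) : Int) + (2 : Int) ^ n * ((x / 2 ^ n : Nat) : Int) = (x : Int) := by
    exact_mod_cast Nat.mod_add_div x (2 ^ n)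
  refine pv_divmod _ _ _ _ hP ?_ (by omega) (by omega)
  have : a = -(x : Int) - 1 := by omega
  rw [this]; linarith

-- word & (2^n - 1) is word mod 2^n (Python-exact also for negative word)
theorem pv_band_mask (a : Int) (n : Nat) :
    PySem.Int.band a (2 ^ n - 1) = a % ((2 : Int) ^ n) := by
  have hP : (0 : Int) < 2 ^ n := by positivity
  have hm : (0 : Int) ≤ 2 ^ n - 1 := by omega
  have htn : ((2 : Int) ^ n - 1).toNat = 2 ^ n - 1 := by
    have : ((2 : Int) ^ n) = ((2 ^ n : Nat) : Int) := by push_cast; ring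
    omega
  by_cases ha : 0 ≤ a
  · rw [PySem.Int.band_of_nonneg ha hm, htn, Nat.and_two_pow_sub_one_eq_mod]
    have h1 := (pv_cast_divmod a.toNat n).2
    rw [Int.toNat_of_nonneg ha] at h1
    omega
  · have ha' : a < 0 := by omega
    have hband : PySem.Int.band a (2 ^ n - 1)
        = ((((2 : Int) ^ n - 1).toNat - (((2 : Int) ^ n - 1).toNat &&& (-a - 1).toNat) : Nat) : Int) := by
      simp only [PySem.Int.band, if_neg ha, if_pos hm]
    rw [hband, htn, Nat.and_comm, Nat.and_two_pow_sub_one_eq_mod, (pv_neg_divmod a n ha').2]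
    have hlt : (-a - 1).toNat % 2 ^ n < 2 ^ n := Nat.mod_lt _ (by positivity)
    push_cast [Nat.cast_sub (by omega : (-a - 1).toNat % 2 ^ n ≤ 2 ^ n - 1)]
    omega

-- word & 2^n tests bit n (Python-exact also for negative word)
theorem pv_band_bit (a : Int) (n : Nat) :
    (PySem.Int.band a (2 ^ n) ≠ 0) ↔ (a / 2 ^ n) % 2 = 1 := by
  have hP : (0 : Int) < 2 ^ n := by positivity
  have hPn : 0 < 2 ^ n := Nat.two_pow_pos n
  have htn : ((2 : Int) ^ n).toNat = 2 ^ n := by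
    have : ((2 : Int) ^ n) = ((2 ^ n : Nat) : Int) := by push_cast; ring
    omega
  by_cases ha : 0 ≤ a
  · rw [PySem.Int.band_of_nonneg ha (le_of_lt hP), htn, Nat.and_two_pow,
      Nat.testBit_eq_decide_div_mod_eq]
    have h1 := (pv_cast_divmod a.toNat n).1
    rw [Int.toNat_of_nonneg ha] at h1
    rw [h1]
    by_cases hbit : a.toNat / 2 ^ n % 2 = 1
    · simp only [hbit, decide_true, Bool.toNat_true, one_mul]
      constructor
      · intro _; omega
      · intro _; exact_mod_cast (by positivity : (0 : Int) < ((2 ^ n : Nat) : Int)).ne'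
    · simp only [hbit, decide_false, Bool.toNat_false, zero_mul, Nat.cast_zero]
      constructor
      · intro h; exact absurd rfl h
      · intro h; omega
  · have ha' : a < 0 := by omega
    have hband : PySem.Int.band a (2 ^ n)
        = ((((2 : Int) ^ n).toNat - (((2 : Int) ^ n).toNat &&& (-a - 1).toNat) : Nat) : Int) := by
      simp only [PySem.Int.band, if_neg ha, if_pos (le_of_lt hP)]
    rw [hband, htn, Nat.and_comm, Nat.and_two_pow, Nat.testBit_eq_decide_div_mod_eq,
      (pv_neg_divmod a n ha').1]
    by_cases hbit : (-a - 1).toNat / 2 ^ n % 2 = 1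
    · simp only [hbit, decide_true, Bool.toNat_true, one_mul, Nat.sub_self, Nat.cast_zero]
      constructor
      · intro h; exact absurd rfl h
      · intro h; omega
    · simp only [hbit, decide_false, Bool.toNat_false, zero_mul, Nat.sub_zero]
      constructor
      · intro _; omega
      · intro _
        exact_mod_cast (by exact_mod_cast hP : (0 : Int) < ((2 ^ n : Nat) : Int)).ne'
  
-- splitting off the top bit of the mask
theorem pv_mask_step (a : Int) (n : Nat) :
    a % ((2 : Int) ^ (n + 1)) = a % ((2 : Int) ^ n) + 2 ^ n * ((a / 2 ^ n) % 2) := by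
  have hP : (0 : Int) < 2 ^ n := by positivity
  have hdm := Int.mul_ediv_add_emod a ((2 : Int) ^ n)
  have hdm2 := Int.mul_ediv_add_emod (a / 2 ^ n) (2 : Int)
  have hr := Int.emod_nonneg a (ne_of_gt hP)
  have hr2 : a % 2 ^ n < 2 ^ n := Int.emod_lt_of_pos _ hP
  have hq : (a / 2 ^ n) % 2 = 0 ∨ (a / 2 ^ n) % 2 = 1 := by omega
  have h2 : (2 : Int) ^ (n + 1) = 2 ^ n * 2 := by ring
  have heq : a = (a % 2 ^ n + 2 ^ n * ((a / 2 ^ n) % 2)) + (2 : Int) ^ (n + 1) * ((a / 2 ^ n) / 2) := by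
    rw [h2]; nlinarith [hdm, hdm2]
  refine ((pv_divmod a ((2 : Int) ^ (n + 1)) ((a / 2 ^ n) / 2) _ (by positivity) heq ?_ ?_).2)
  · rcases hq with h | h <;> rw [h] <;> linarith
  · rcases hq with h | h <;> rw [h] <;> rw [h2] <;> linarith

-- low-bit halving of bitCount, valid also at 0
theorem pv_bitCount_halve (a : Nat) :
    PySem.Int.bitCount (a : Int) = a % 2 + PySem.Int.bitCount ((a / 2 : Nat) : Int) := by
  rcases Nat.eq_zero_or_pos a with h | h
  · subst h; simp [PySem.Int.bitCount_zero]
  · exact PySem.Int.bitCount_natCast h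

-- adding a high bit adds one to the popcount
theorem pv_bitCount_add_pow (n : Nat) : ∀ m : Nat, m < 2 ^ n →
    PySem.Int.bitCount ((m + 2 ^ n : Nat) : Int) = PySem.Int.bitCount (m : Int) + 1 := by
  induction n with
  | zero =>
      intro m hm
      interval_cases m
      decide
  | succ n ih =>
      intro m hm
      have h2 : 2 ^ (n + 1) = 2 * 2 ^ n := by ring
      have h1 : (m + 2 ^ (n + 1)) % 2 = m % 2 := by omega
      have hq : (m + 2 ^ (n + 1)) / 2 = m / 2 + 2 ^ n := by omega
      have h3 : m / 2 < 2 ^ n := by omega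
      rw [pv_bitCount_halve (m + 2 ^ (n + 1)), h1, hq, ih _ h3, pv_bitCount_halve m]
      ring

-- one step of B's closed form
theorem pv_bitcount_mask_step (word : Int) (n : Nat) :
    (PySem.Int.bitCount (PySem.Int.band word (2 ^ (n + 1) - 1)) : Int)
      = (PySem.Int.bitCount (PySem.Int.band word (2 ^ n - 1)) : Int)
        + (if PySem.Int.band word ((1 : Int) <<< n) ≠ 0 then 1 else 0) := by
  have hP : (0 : Int) < 2 ^ n := by positivity
  have hsh : (1 : Int) <<< n = 2 ^ n := by rw [Int.shiftLeft_eq]; ring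
  rw [pv_band_mask, pv_band_mask, hsh, pv_mask_step]
  have hr := Int.emod_nonneg word (ne_of_gt hP)
  have hr2 : word % 2 ^ n < 2 ^ n := Int.emod_lt_of_pos _ hP
  have hmn : ((word % 2 ^ n).toNat : Int) = word % 2 ^ n := Int.toNat_of_nonneg hr
  by_cases hbit : (word / 2 ^ n) % 2 = 1
  · have hb : PySem.Int.band word (2 ^ n) ≠ 0 := (pv_band_bit word n).mpr hbit
    rw [if_pos hb, hbit]
    have hcast : word % 2 ^ n + 2 ^ n * 1 = (((word % 2 ^ n).toNat + 2 ^ n : Nat) : Int) := by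
      push_cast; omega
    have hlt : (word % 2 ^ n).toNat < 2 ^ n := by
      have : ((2 : Int) ^ n) = ((2 ^ n : Nat) : Int) := by push_cast; ring
      omega
    rw [hcast, pv_bitCount_add_pow n _ hlt, hmn]
    push_cast; ring
  · have hb : ¬ PySem.Int.band word (2 ^ n) ≠ 0 := fun h => hbit ((pv_band_bit word n).mp h)
    have hb0 : (word / 2 ^ n) % 2 = 0 := by omega
    rw [if_neg hb, hb0]
    simp

-- A's loop over the first n bits equals B's closed form
theorem pv_key (word : Int) (n : Nat) :
    disparity word (n : Int)
      = 2 * (PySem.Int.bitCount (PySem.Int.band word (2 ^ n - 1)) : Int) - n := by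
  induction n with
  | zero =>
      simp [disparity, PySem.List.pyRange_one_eq_nil (by norm_num : (0:Int) ≤ 0)]
  | succ n ih =>
      have hsplit : PySem.List.pyRange 0 ((n : Int) + 1) 1
          = PySem.List.pyRange 0 (n : Int) 1 ++ [(n : Int)] :=
        PySem.List.pyRange_one_succ_right (by positivity)
      have hc : ((n + 1 : Nat) : Int) = (n : Int) + 1 := by push_cast; ring
      simp only [disparity, hc, hsplit, List.foldl_append, List.foldl_cons, List.foldl_nil]
      set st := (PySem.List.pyRange 0 (n : Int) 1).foldl (dispStep word) ((0 : Int), (0 : Int)) with hst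
      have ihe : st.2 - st.1 = 2 * (PySem.Int.bitCount (PySem.Int.band word (2 ^ n - 1)) : Int) - n := by
        simpa [disparity, hst] using ih
      have hstep := pv_bitcount_mask_step word n
      have htn : ((n : Int)).toNat = n := by omega
      by_cases hbit : PySem.Int.band word ((1 : Int) <<< n) ≠ 0
      · rw [if_pos hbit] at hstep
        simp only [dispStep, htn, if_pos hbit]
        omega
      · rw [if_neg hbit] at hstep
        simp only [dispStep, htn, if_neg hbit]
        omega

-- ===== VERDICT (by name: the statement is the Claim_ definition above) =====
theorem disparity_spec : Claim_equal_disparity := by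
  intro word nbits _
  unfold Spec_disparity
  by_cases h : nbits ≤ 0
  · have hmax : max nbits 0 = 0 := by omega
    simp [disparity, disparity_alt, hmax, PySem.List.pyRange_one_eq_nil h]
  · have h0 : 0 ≤ nbits := by omega
    have hn : nbits = ((nbits.toNat : Nat) : Int) := by omega
    have hmax : max nbits 0 = nbits := by omega
    rw [hn, pv_key word nbits.toNat]
    simp only [disparity_alt]
    rw [← hn, hmax]
    have hsh : (1 : Int) <<< nbits.toNat = 2 ^ nbits.toNat := by rw [Int.shiftLeft_eq]; ring
    rw [hsh, hn]
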